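/- GENERATED by farm/mkstatement.py from design/units.tsv (unit `decode_all.4`) and the assertions of Vorbis/Spec/DecodeAll.lean — do not edit.
   THE STATEMENT of the proof unit `decode_all.4`: segment 4 of `decode_all` (14 instructions; entries 0x1035da;
   exits 0x1035c5,0x103640; ranges 0x1035da-0x103607)
   takes each of its entry assertions to one of its exit assertions (`Vorbis.Spec.decode_all.Seg4`), given the contracts of its callees.
   What the names mean: Vorbis/Spec/Basic.lean (the shared hypotheses), Vorbis/Spec/DecodeAll.lean (the assertions). The theorem to prove:
   `theorem decode_all_4_ok : Vorbis.Spec.decode_all_4.Statement`. -/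
import Vorbis.Spec.DecodeAll
import Vorbis.Spec.Top
namespace Vorbis.Spec.decode_all_4
open X86 X86.User Asan

/-- The statement of unit `decode_all.4`. -/
def Statement : Prop :=
  ∀ (Lay : Layout) (_hLay : Lay.hi = 0x1000000) (μ : Microarch) (_hμ : UserX.MicroOK μ) (u₀ : State)
    (_hcode : HasCodeNat Lay u₀ Vorbis.L.decode_all.entry Vorbis.Code.code_decode_all.nat Vorbis.L.decode_all.size)
    (_h_copy_frame : ∀ (others : List Obj) (frames : List (Nat × FrameLayout)), Calls Lay μ Vorbis.WayInv (Vorbis.conv u₀) Vorbis.L.copy_frame.entry (Vorbis.Spec.copy_frame.spec others frames)),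
    Vorbis.Spec.decode_all.Seg4 Lay μ u₀

end Vorbis.Spec.decode_all_4
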